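-- pv_equiv track=rewrite | github.com/bscaramu/assignment7pythonbruno | bitwise_operations.py | bitwise_operations
-- ===== SOURCE A (Python) =====
-- def bitwise_operations(numbers):
--     bitwise_and = numbers[0]
--     bitwise_or = numbers[0]
--     bitwise_xor = numbers[0]
--     for number in numbers[1:]:
--         bitwise_and &= number
--         bitwise_or |= number
--         bitwise_xor ^= number
--     return bitwise_and, bitwise_or, bitwise_xor
-- ===== SOURCE B (Python) =====
-- def _reduce(op, seq, acc):
--     for x in seq:
--         acc = op(acc, x)
--     return acc
--
-- def bitwise_operations(numbers):
--     head, tail = numbers[0], numbers[1:]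
--     return (_reduce(lambda a, b: a & b, tail, head),
--             _reduce(lambda a, b: a | b, tail, head),
--             _reduce(lambda a, b: a ^ b, tail, head))
-- ===== Notes on version B (the rewrite author's own statement) =====
-- stated objective: alternative
-- what changed: The single fused loop carrying a triple accumulator is replaced by three independent single-operator reduction passes (a generic _reduce helper applied separately for &, |, ^).
import Mathlib
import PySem

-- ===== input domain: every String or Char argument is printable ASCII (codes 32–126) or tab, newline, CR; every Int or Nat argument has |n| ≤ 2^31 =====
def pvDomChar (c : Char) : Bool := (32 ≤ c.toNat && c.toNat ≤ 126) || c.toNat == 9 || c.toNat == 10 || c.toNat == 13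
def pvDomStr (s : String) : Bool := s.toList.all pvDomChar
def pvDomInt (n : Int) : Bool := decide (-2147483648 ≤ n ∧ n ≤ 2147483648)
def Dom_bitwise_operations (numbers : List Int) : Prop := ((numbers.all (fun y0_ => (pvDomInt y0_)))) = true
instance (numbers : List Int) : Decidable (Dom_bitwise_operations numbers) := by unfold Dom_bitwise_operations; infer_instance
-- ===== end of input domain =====

-- B replaces A's single fused loop (triple accumulator) by three independent one-operator
-- reduction passes; same O(n) cost, different decomposition.

-- ===== PORT A =====
-- A: one loop over numbers[1:] updating the three accumulators together.
def bitwise_operations (numbers : List Int) : Int × Int × Int :=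
  match PySem.List.pyGet? numbers 0 with
  | none => (0, 0, 0)   -- unreachable under Pre_ (Python raises IndexError on [])
  | some h =>
    let st := (PySem.List.slice numbers (some 1) none).foldl
      (fun (acc : Int × Int × Int) number =>
        (PySem.Int.band acc.1 number, PySem.Int.bor acc.2.1 number, PySem.Int.bxor acc.2.2 number))
      (h, h, h)
    st

-- ===== PORT B =====
-- B: a generic single-operator reduce, applied three times.
def pyReduce (op : Int → Int → Int) (seq : List Int) (acc : Int) : Int :=
  seq.foldl op acc

def bitwise_operations_alt (numbers : List Int) : Int × Int × Int :=
  match PySem.List.pyGet? numbers 0 with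
  | none => (0, 0, 0)   -- unreachable under Pre_ (Python raises IndexError on [])
  | some head =>
    let tail := PySem.List.slice numbers (some 1) none
    (pyReduce PySem.Int.band tail head,
     pyReduce PySem.Int.bor tail head,
     pyReduce PySem.Int.bxor tail head)

-- ===== PRECONDITION & SPEC =====
-- Pre_ excludes only the empty list, on which both Pythons raise IndexError at numbers[0].
def Pre_bitwise_operations (numbers : List Int) : Prop := numbers ≠ []
instance (numbers : List Int) : Decidable (Pre_bitwise_operations numbers) := by
  unfold Pre_bitwise_operations; infer_instance

def pvWitness_bitwise_operations : List Int := [5, 3, 12]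

def Spec_bitwise_operations (numbers : List Int) (out : Int × Int × Int) : Prop := out = bitwise_operations_alt numbers
instance (numbers : List Int) (out : Int × Int × Int) : Decidable (Spec_bitwise_operations numbers out) := by unfold Spec_bitwise_operations; infer_instance

-- ===== CLAIM (what is proved, stated in full; the proofs are below) =====
def Claim_equal_bitwise_operations : Prop := ∀ (numbers : List Int), Dom_bitwise_operations numbers → Pre_bitwise_operations numbers → Spec_bitwise_operations numbers (bitwise_operations numbers)

-- ===== LEMMAS AND PROOFS =====

-- The fused triple fold splits into the three independent folds.
theorem fused_split (tail : List Int) (a o x : Int) :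
    tail.foldl
      (fun (acc : Int × Int × Int) number =>
        (PySem.Int.band acc.1 number, PySem.Int.bor acc.2.1 number, PySem.Int.bxor acc.2.2 number))
      (a, o, x)
    = (tail.foldl PySem.Int.band a,
       tail.foldl (PySem.Int.bor) o,
       tail.foldl (PySem.Int.bxor) x) := by
  induction tail generalizing a o x with
  | nil => rfl
  | cons n t ih => simpa [List.foldl] using ih (PySem.Int.band a n) (PySem.Int.bor o n) (PySem.Int.bxor x n)

-- ===== VERDICT (by name: the statement is the Claim_ definition above) =====
theorem bitwise_operations_spec : Claim_equal_bitwise_operations := by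
  intro numbers _ hpre
  unfold Spec_bitwise_operations bitwise_operations bitwise_operations_alt pyReduce
  cases numbers with
  | nil => exact absurd rfl hpre
  | cons h t =>
    simp [PySem.List.pyGet?, PySem.List.pyIdx?, fused_split]
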